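-- pv_equiv track=rewrite | github.com/kyzavlad/vladkuzmenko.com | video-processing-service/app/services/music/music_library.py | _get_compatible_genres
-- ===== SOURCE A (Python) =====
-- from typing import Dict, Any, List, Optional, Union
--
-- def _get_compatible_genres(genre: str) -> List[str]:
--     """
--     Get compatible genres based on musical similarity.
--
--     Args:
--         genre: Target genre
--
--     Returns:
--         List of compatible genres
--     """
--     # Define genre compatibility groups
--     genre_groups = {
--         "rock": ["alternative", "indie", "pop_rock", "hard_rock", "classic_rock"],
--         "pop": ["dance_pop", "electropop", "synth_pop", "indie_pop"],
--         "electronic": ["edm", "techno", "house", "trance", "dubstep"],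
--         "hip_hop": ["rap", "trap", "r&b", "urban"],
--         "jazz": ["blues", "soul", "funk", "fusion"],
--         "classical": ["orchestral", "chamber", "piano", "opera"],
--         "country": ["folk", "bluegrass", "americana"],
--         "ambient": ["new_age", "chillout", "atmospheric"],
--         "metal": ["heavy_metal", "thrash", "death_metal", "hard_rock"],
--         "world": ["latin", "reggae", "afrobeat", "ethnic"]
--     }
--
--     # Find the group containing the genre
--     for group_genre, compatible_genres in genre_groups.items():
--         if genre == group_genre or genre in compatible_genres:
--             # Return all genres in the group
--             result = [group_genre] + compatible_genres
--             return [g for g in result if g != genre]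
--
--     # If genre not found in any group, return empty list
--     return []
-- ===== SOURCE B (Python) =====
-- from typing import List
--
-- # Fully precomputed compatibility table: every known genre is mapped directly
-- # to its final answer (its group's key and members with the genre itself
-- # already removed), so a call is a single dict lookup with no per-call scan
-- # or filtering.
-- _COMPATIBLE = {
--     "rock": ["alternative", "indie", "pop_rock", "hard_rock", "classic_rock"],
--     "alternative": ["rock", "indie", "pop_rock", "hard_rock", "classic_rock"],
--     "indie": ["rock", "alternative", "pop_rock", "hard_rock", "classic_rock"],
--     "pop_rock": ["rock", "alternative", "indie", "hard_rock", "classic_rock"],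
--     "hard_rock": ["rock", "alternative", "indie", "pop_rock", "classic_rock"],
--     "classic_rock": ["rock", "alternative", "indie", "pop_rock", "hard_rock"],
--     "pop": ["dance_pop", "electropop", "synth_pop", "indie_pop"],
--     "dance_pop": ["pop", "electropop", "synth_pop", "indie_pop"],
--     "electropop": ["pop", "dance_pop", "synth_pop", "indie_pop"],
--     "synth_pop": ["pop", "dance_pop", "electropop", "indie_pop"],
--     "indie_pop": ["pop", "dance_pop", "electropop", "synth_pop"],
--     "electronic": ["edm", "techno", "house", "trance", "dubstep"],
--     "edm": ["electronic", "techno", "house", "trance", "dubstep"],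
--     "techno": ["electronic", "edm", "house", "trance", "dubstep"],
--     "house": ["electronic", "edm", "techno", "trance", "dubstep"],
--     "trance": ["electronic", "edm", "techno", "house", "dubstep"],
--     "dubstep": ["electronic", "edm", "techno", "house", "trance"],
--     "hip_hop": ["rap", "trap", "r&b", "urban"],
--     "rap": ["hip_hop", "trap", "r&b", "urban"],
--     "trap": ["hip_hop", "rap", "r&b", "urban"],
--     "r&b": ["hip_hop", "rap", "trap", "urban"],
--     "urban": ["hip_hop", "rap", "trap", "r&b"],
--     "jazz": ["blues", "soul", "funk", "fusion"],
--     "blues": ["jazz", "soul", "funk", "fusion"],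
--     "soul": ["jazz", "blues", "funk", "fusion"],
--     "funk": ["jazz", "blues", "soul", "fusion"],
--     "fusion": ["jazz", "blues", "soul", "funk"],
--     "classical": ["orchestral", "chamber", "piano", "opera"],
--     "orchestral": ["classical", "chamber", "piano", "opera"],
--     "chamber": ["classical", "orchestral", "piano", "opera"],
--     "piano": ["classical", "orchestral", "chamber", "opera"],
--     "opera": ["classical", "orchestral", "chamber", "piano"],
--     "country": ["folk", "bluegrass", "americana"],
--     "folk": ["country", "bluegrass", "americana"],
--     "bluegrass": ["country", "folk", "americana"],
--     "americana": ["country", "folk", "bluegrass"],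
--     "ambient": ["new_age", "chillout", "atmospheric"],
--     "new_age": ["ambient", "chillout", "atmospheric"],
--     "chillout": ["ambient", "new_age", "atmospheric"],
--     "atmospheric": ["ambient", "new_age", "chillout"],
--     "metal": ["heavy_metal", "thrash", "death_metal", "hard_rock"],
--     "heavy_metal": ["metal", "thrash", "death_metal", "hard_rock"],
--     "thrash": ["metal", "heavy_metal", "death_metal", "hard_rock"],
--     "death_metal": ["metal", "heavy_metal", "thrash", "hard_rock"],
--     "world": ["latin", "reggae", "afrobeat", "ethnic"],
--     "latin": ["world", "reggae", "afrobeat", "ethnic"],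
--     "reggae": ["world", "latin", "afrobeat", "ethnic"],
--     "afrobeat": ["world", "latin", "reggae", "ethnic"],
--     "ethnic": ["world", "latin", "reggae", "afrobeat"],
-- }
--
-- def _get_compatible_genres(genre: str) -> List[str]:
--     return list(_COMPATIBLE.get(genre, []))
-- ===== Notes on version B (the rewrite author's own statement) =====
-- stated objective: alternative
-- what changed: Replaces A's per-call scan over the groups (membership test, list concatenation and filter on the hit) by a fully precomputed module-level table mapping every known genre directly to its final answer, so a call is a single dict lookup plus a copy.
import Mathlib
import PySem

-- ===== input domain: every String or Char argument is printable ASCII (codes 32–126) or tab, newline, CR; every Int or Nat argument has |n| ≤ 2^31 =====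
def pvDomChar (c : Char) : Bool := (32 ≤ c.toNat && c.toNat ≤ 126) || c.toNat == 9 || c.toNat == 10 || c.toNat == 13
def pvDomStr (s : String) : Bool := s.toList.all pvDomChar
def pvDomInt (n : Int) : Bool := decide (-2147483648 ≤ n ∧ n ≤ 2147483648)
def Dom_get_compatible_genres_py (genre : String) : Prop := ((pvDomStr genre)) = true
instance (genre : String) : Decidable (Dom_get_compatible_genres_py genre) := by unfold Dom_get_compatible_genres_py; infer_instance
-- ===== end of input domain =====

-- B replaces A's per-call scan over the compatibility groups by a fully
-- precomputed table that maps every known genre directly to its final answer;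
-- a call is a single lookup, same return value everywhere.

-- ===== PORT A =====
-- A declares the group table and scans it: the first group whose key or
-- members contain the genre yields [group_genre] + members minus the genre.
def pvGroups : List (String × List String) := [
  ("rock", ["alternative", "indie", "pop_rock", "hard_rock", "classic_rock"]),
  ("pop", ["dance_pop", "electropop", "synth_pop", "indie_pop"]),
  ("electronic", ["edm", "techno", "house", "trance", "dubstep"]),
  ("hip_hop", ["rap", "trap", "r&b", "urban"]),
  ("jazz", ["blues", "soul", "funk", "fusion"]),
  ("classical", ["orchestral", "chamber", "piano", "opera"]),
  ("country", ["folk", "bluegrass", "americana"]),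
  ("ambient", ["new_age", "chillout", "atmospheric"]),
  ("metal", ["heavy_metal", "thrash", "death_metal", "hard_rock"]),
  ("world", ["latin", "reggae", "afrobeat", "ethnic"])]

def pvFindGroup : List (String × List String) → String → List String
  | [], _ => []
  | (g, cs) :: rest, genre =>
    if genre = g ∨ genre ∈ cs then (g :: cs).filter (fun x => x ≠ genre)
    else pvFindGroup rest genre

def get_compatible_genres_py (genre : String) : List String :=
  pvFindGroup pvGroups genre

-- ===== PORT B =====
-- B's module-level precomputed table: genre → its final answer.
def pvCompatible : List (String × List String) := [
  ("rock", ["alternative", "indie", "pop_rock", "hard_rock", "classic_rock"]),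
  ("alternative", ["rock", "indie", "pop_rock", "hard_rock", "classic_rock"]),
  ("indie", ["rock", "alternative", "pop_rock", "hard_rock", "classic_rock"]),
  ("pop_rock", ["rock", "alternative", "indie", "hard_rock", "classic_rock"]),
  ("hard_rock", ["rock", "alternative", "indie", "pop_rock", "classic_rock"]),
  ("classic_rock", ["rock", "alternative", "indie", "pop_rock", "hard_rock"]),
  ("pop", ["dance_pop", "electropop", "synth_pop", "indie_pop"]),
  ("dance_pop", ["pop", "electropop", "synth_pop", "indie_pop"]),
  ("electropop", ["pop", "dance_pop", "synth_pop", "indie_pop"]),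
  ("synth_pop", ["pop", "dance_pop", "electropop", "indie_pop"]),
  ("indie_pop", ["pop", "dance_pop", "electropop", "synth_pop"]),
  ("electronic", ["edm", "techno", "house", "trance", "dubstep"]),
  ("edm", ["electronic", "techno", "house", "trance", "dubstep"]),
  ("techno", ["electronic", "edm", "house", "trance", "dubstep"]),
  ("house", ["electronic", "edm", "techno", "trance", "dubstep"]),
  ("trance", ["electronic", "edm", "techno", "house", "dubstep"]),
  ("dubstep", ["electronic", "edm", "techno", "house", "trance"]),
  ("hip_hop", ["rap", "trap", "r&b", "urban"]),
  ("rap", ["hip_hop", "trap", "r&b", "urban"]),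
  ("trap", ["hip_hop", "rap", "r&b", "urban"]),
  ("r&b", ["hip_hop", "rap", "trap", "urban"]),
  ("urban", ["hip_hop", "rap", "trap", "r&b"]),
  ("jazz", ["blues", "soul", "funk", "fusion"]),
  ("blues", ["jazz", "soul", "funk", "fusion"]),
  ("soul", ["jazz", "blues", "funk", "fusion"]),
  ("funk", ["jazz", "blues", "soul", "fusion"]),
  ("fusion", ["jazz", "blues", "soul", "funk"]),
  ("classical", ["orchestral", "chamber", "piano", "opera"]),
  ("orchestral", ["classical", "chamber", "piano", "opera"]),
  ("chamber", ["classical", "orchestral", "piano", "opera"]),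
  ("piano", ["classical", "orchestral", "chamber", "opera"]),
  ("opera", ["classical", "orchestral", "chamber", "piano"]),
  ("country", ["folk", "bluegrass", "americana"]),
  ("folk", ["country", "bluegrass", "americana"]),
  ("bluegrass", ["country", "folk", "americana"]),
  ("americana", ["country", "folk", "bluegrass"]),
  ("ambient", ["new_age", "chillout", "atmospheric"]),
  ("new_age", ["ambient", "chillout", "atmospheric"]),
  ("chillout", ["ambient", "new_age", "atmospheric"]),
  ("atmospheric", ["ambient", "new_age", "chillout"]),
  ("metal", ["heavy_metal", "thrash", "death_metal", "hard_rock"]),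
  ("heavy_metal", ["metal", "thrash", "death_metal", "hard_rock"]),
  ("thrash", ["metal", "heavy_metal", "death_metal", "hard_rock"]),
  ("death_metal", ["metal", "heavy_metal", "thrash", "hard_rock"]),
  ("world", ["latin", "reggae", "afrobeat", "ethnic"]),
  ("latin", ["world", "reggae", "afrobeat", "ethnic"]),
  ("reggae", ["world", "latin", "afrobeat", "ethnic"]),
  ("afrobeat", ["world", "latin", "reggae", "ethnic"]),
  ("ethnic", ["world", "latin", "reggae", "afrobeat"])]

-- dict.get(genre, []) — first-match lookup in the association list
def pvGet : List (String × List String) → String → List String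
  | [], _ => []
  | (k, v) :: rest, genre => if genre = k then v else pvGet rest genre

def get_compatible_genres_py_alt (genre : String) : List String :=
  pvGet pvCompatible genre

-- ===== PRECONDITION & SPEC =====
def Spec_get_compatible_genres_py (genre : String) (out : List String) : Prop := out = get_compatible_genres_py_alt genre
instance (genre : String) (out : List String) : Decidable (Spec_get_compatible_genres_py genre out) := by unfold Spec_get_compatible_genres_py; infer_instance

-- ===== CLAIM =====
def Claim_equal_get_compatible_genres_py : Prop := ∀ (genre : String), Dom_get_compatible_genres_py genre → Spec_get_compatible_genres_py genre (get_compatible_genres_py genre)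

-- ===== LEMMAS AND PROOFS =====
-- every genre name occurring anywhere in A's table (= the keys of B's table)
def pvAllGenres : List String := ["rock", "alternative", "indie", "pop_rock", "hard_rock", "classic_rock", "pop", "dance_pop", "electropop", "synth_pop", "indie_pop", "electronic", "edm", "techno", "house", "trance", "dubstep", "hip_hop", "rap", "trap", "r&b", "urban", "jazz", "blues", "soul", "funk", "fusion", "classical", "orchestral", "chamber", "piano", "opera", "country", "folk", "bluegrass", "americana", "ambient", "new_age", "chillout", "atmospheric", "metal", "heavy_metal", "thrash", "death_metal", "world", "latin", "reggae", "afrobeat", "ethnic"]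

-- pvGet misses any key not present in the association list
theorem pvGet_none (L : List (String × List String)) {genre : String}
    (hm : genre ∉ L.map Prod.fst) : pvGet L genre = [] := by
  induction L with
  | nil => rfl
  | cons p rest ih =>
    obtain ⟨k, v⟩ := p
    simp only [List.map, List.mem_cons, not_or] at hm
    simp only [pvGet, if_neg hm.1]
    exact ih hm.2

-- B's table is keyed by exactly the genres of A's table
set_option maxRecDepth 100000 in
theorem pvCompatible_keys : pvCompatible.map Prod.fst = pvAllGenres := by decide

-- ===== VERDICT =====
set_option maxRecDepth 100000 in
theorem get_compatible_genres_py_spec : Claim_equal_get_compatible_genres_py := by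
  intro genre _
  unfold Spec_get_compatible_genres_py
  by_cases h : genre ∈ pvAllGenres
  · have hall : ∀ s ∈ pvAllGenres, get_compatible_genres_py s = get_compatible_genres_py_alt s := by decide
    exact hall genre h
  · have hR : get_compatible_genres_py_alt genre = [] := by
      unfold get_compatible_genres_py_alt
      exact pvGet_none pvCompatible (by rw [pvCompatible_keys]; exact h)
    simp only [pvAllGenres, List.mem_cons, List.not_mem_nil, or_false, not_or] at h
    obtain ⟨h0, h1, h2, h3, h4, h5, h6, h7, h8, h9, h10, h11, h12, h13, h14, h15, h16, h17, h18, h19, h20, h21, h22, h23, h24, h25, h26, h27, h28, h29, h30, h31, h32, h33, h34, h35, h36, h37, h38, h39, h40, h41, h42, h43, h44, h45, h46, h47, h48⟩ := h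
    have hL : get_compatible_genres_py genre = [] := by
      simp only [get_compatible_genres_py, pvGroups, pvFindGroup, List.mem_cons,
        List.not_mem_nil, h0, h1, h2, h3, h4, h5, h6, h7, h8, h9, h10, h11, h12, h13, h14, h15, h16, h17, h18, h19, h20, h21, h22, h23, h24, h25, h26, h27, h28, h29, h30, h31, h32, h33, h34, h35, h36, h37, h38, h39, h40, h41, h42, h43, h44, h45, h46, h47, h48, or_self, if_false]
    rw [hL, hR]
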